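-- pv_equiv track=rewrite | github.com/MrBrantCode/unitest_baseline | mut_generate/mist_train_taco/taco_17588/solution.py | min_steps_to_balance_piles
-- ===== SOURCE A (Python) =====
-- from collections import Counter
--
-- def min_steps_to_balance_piles(N, K, A):
--     C = Counter(A)
--     A = [[v, cnt] for (v, cnt) in C.items()]
--     A.sort(key=lambda p: p[0])
--     N = len(A)
--
--     for i in range(N - 1, -1, -1):
--         if A[i][0] - A[0][0] <= K:
--             break
--     i += 1
--
--     if i >= N:
--         return 0
--
--     (allcnt, cost) = (0, 0)
--     for j in range(i, N):
--         allcnt += A[j][1]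
--         cost += (A[j][0] - A[0][0] - K) * A[j][1]
--
--     ans = cost
--     for j in range(N - 1):
--         if A[N - 1][0] - A[j][0] <= K:
--             break
--         v = A[j][0]
--         cost += v * A[j][1]
--         vn = A[j + 1][0]
--         diff = vn - v
--         while i < N:
--             if A[i][0] - vn <= K:
--                 cost -= (A[i][0] - v - K) * A[i][1]
--                 allcnt -= A[i][1]
--                 i += 1
--             else:
--                 cost -= diff * allcnt
--                 break
--         ans = min(ans, cost)
--
--     return ans
-- ===== SOURCE B (Python) =====
-- from collections import Counter
-- from bisect import bisect_right
--
-- def min_steps_to_balance_piles(N, K, A):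
--     C = Counter(A)
--     vals = sorted(C)
--     n = len(vals)
--     # prefix counts and prefix sums of count*value over the distinct values
--     pc = [0] * (n + 1)
--     ps = [0] * (n + 1)
--     for t, v in enumerate(vals):
--         pc[t + 1] = pc[t] + C[v]
--         ps[t + 1] = ps[t] + C[v] * v
--     # first index past the window based at the lowest value (the base pile
--     # itself, index 0, is always inside its own window)
--     start = bisect_right(vals, vals[0] + K, 1)
--     if start >= n:
--         return 0
--     best = None
--     for t, v in enumerate(vals):
--         # piles below the base v are removed entirely; piles past the window
--         # top v+K are trimmed down to it
--         h = bisect_right(vals, v + K, start)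
--         cost = ps[t] + (ps[n] - ps[h]) - (v + K) * (pc[n] - pc[h])
--         if best is None or cost < best:
--             best = cost
--         if vals[-1] - v <= K:
--             break
--     return best
-- ===== Notes on version B (the rewrite author's own statement) =====
-- stated objective: alternative
-- what changed: B sorts the distinct pile values once, builds prefix tables of cumulative counts and count*value sums, and evaluates each candidate window base independently with bisect on the prefix tables, instead of A's incremental sweep that updates a running cost, remaining-count and a moving two-pointer index from one candidate base to the next.
import Mathlib
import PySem

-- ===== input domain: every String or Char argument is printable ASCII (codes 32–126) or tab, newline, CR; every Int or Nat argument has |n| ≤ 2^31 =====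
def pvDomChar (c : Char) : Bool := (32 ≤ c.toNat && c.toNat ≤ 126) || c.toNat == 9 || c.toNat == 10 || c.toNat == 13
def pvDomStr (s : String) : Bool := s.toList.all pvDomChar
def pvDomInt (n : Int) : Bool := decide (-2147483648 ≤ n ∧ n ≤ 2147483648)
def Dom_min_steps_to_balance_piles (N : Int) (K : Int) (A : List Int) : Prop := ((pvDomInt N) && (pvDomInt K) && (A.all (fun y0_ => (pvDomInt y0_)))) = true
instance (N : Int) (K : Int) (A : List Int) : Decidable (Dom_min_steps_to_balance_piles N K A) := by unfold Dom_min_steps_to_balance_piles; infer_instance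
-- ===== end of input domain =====

-- B recomputes each candidate window from prefix-sum tables + binary search instead of A's
-- incremental two-pointer cost updates (objective: alternative algorithm, similar cost).

-- ===== PORT A =====
-- 'for i in range(N-1,-1,-1): if A[i][0]-A[0][0] <= K: break' — value of i after the loop
def aFind (L : List (Int × Int)) (v0 : Int) (K : Int) : Nat → Nat
  | 0 => 0
  | k+1 => if (L.getD (k+1) (0,0)).1 - v0 ≤ K then k+1 else aFind L v0 K k

-- the inner 'while i < N: …' loop; state (i, allcnt, cost); fuel n bounds the i increments
def aWhile (L : List (Int × Int)) (n : Nat) (K v vn diff : Int) :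
    Nat → Nat → Int → Int → Nat × Int × Int
  | 0, i, allcnt, cost => (i, allcnt, cost)
  | fuel+1, i, allcnt, cost =>
    if i < n then
      if (L.getD i (0,0)).1 - vn ≤ K then
        aWhile L n K v vn diff fuel (i+1) (allcnt - (L.getD i (0,0)).2)
          (cost - ((L.getD i (0,0)).1 - v - K) * (L.getD i (0,0)).2)
      else (i, allcnt, cost - diff * allcnt)
    else (i, allcnt, cost)

-- 'for j in range(N-1): …' with its break; rem = number of j values left
def aLoop (L : List (Int × Int)) (n : Nat) (K : Int) :
    Nat → Nat → Nat → Int → Int → Int → Int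
  | 0, _, _, _, _, ans => ans
  | rem+1, j, i, allcnt, cost, ans =>
    if (L.getD (n-1) (0,0)).1 - (L.getD j (0,0)).1 ≤ K then ans
    else
      let v := (L.getD j (0,0)).1
      let cost1 := cost + v * (L.getD j (0,0)).2
      let vn := (L.getD (j+1) (0,0)).1
      let diff := vn - v
      match aWhile L n K v vn diff n i allcnt cost1 with
      | (i', allcnt', cost') => aLoop L n K rem (j+1) i' allcnt' cost' (min ans cost')

def min_steps_to_balance_piles (N : Int) (K : Int) (A : List Int) : Int :=
  let C := PySem.Dict.counter A
  let L := PySem.List.sorted C.items (fun p => p.1)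
  let n := L.length
  if n = 0 then 0   -- Python: UnboundLocalError on empty A; excluded by Pre_
  else
    let i := aFind L (L.getD 0 (0,0)).1 K (n-1) + 1
    if n ≤ i then 0
    else
      let p := (L.drop i).foldl
        (fun (ac : Int × Int) q => (ac.1 + q.2, ac.2 + (q.1 - (L.getD 0 (0,0)).1 - K) * q.2))
        ((0 : Int), (0 : Int))
      aLoop L n K (n-1) 0 i p.1 p.2 p.2

-- ===== PORT B =====
def min_steps_to_balance_piles_alt (N : Int) (K : Int) (A : List Int) : Int :=
  let C := PySem.Dict.counter A
  let vals := PySem.List.sorted C.keys (fun v => v)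
  let n := vals.length
  if n = 0 then 0   -- Python: IndexError on vals[0] for empty A; excluded by Pre_
  else
    -- 'for v in vals: pc.append(pc[-1]+C[v]); ps.append(ps[-1]+C[v]*v)'
    let pcps := vals.foldl
      (fun (st : List Int × List Int) v =>
        (st.1 ++ [st.1.getD (st.1.length - 1) 0 + C.getD v 0],
         st.2 ++ [st.2.getD (st.2.length - 1) 0 + C.getD v 0 * v]))
      ([(0 : Int)], [(0 : Int)])
    let pc := pcps.1
    let ps := pcps.2
    -- bisect_right(vals, x, 1) on the sorted vals = max 1 (bisect_right(vals, x))
    let start := max 1 (PySem.List.bisectRight vals (vals.getD 0 0 + K))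
    if n ≤ start then 0
    else
      let m := min (n-1) (PySem.List.bisectLeft vals (vals.getD (n-1) 0 - K))
      let cost := fun (t : Nat) =>
        let v := vals.getD t 0
        let h := max start (PySem.List.bisectRight vals (v + K))
        ps.getD t 0 + (ps.getD n 0 - ps.getD h 0) - (v + K) * (pc.getD n 0 - pc.getD h 0)
      (PySem.List.min? ((List.range (m+1)).map cost) (fun x => x)).getD 0

-- ===== PRECONDITION & SPEC =====
-- Pre_ excludes only the empty list, on which both Pythons raise (A: UnboundLocalError, B: IndexError).
def Pre_min_steps_to_balance_piles (N : Int) (K : Int) (A : List Int) : Prop := A ≠ []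
instance (N : Int) (K : Int) (A : List Int) : Decidable (Pre_min_steps_to_balance_piles N K A) := by
  unfold Pre_min_steps_to_balance_piles; infer_instance
def pvWitness_min_steps_to_balance_piles : Int × Int × List Int := (3, 2, [1, 5, 3])
def Spec_min_steps_to_balance_piles (N : Int) (K : Int) (A : List Int) (out : Int) : Prop := out = min_steps_to_balance_piles_alt N K A
instance (N : Int) (K : Int) (A : List Int) (out : Int) : Decidable (Spec_min_steps_to_balance_piles N K A out) := by unfold Spec_min_steps_to_balance_piles; infer_instance

-- ===== CLAIM (what is proved, stated in full; the proofs are below) =====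
def Claim_equal_min_steps_to_balance_piles : Prop := ∀ (N : Int) (K : Int) (A : List Int), Dom_min_steps_to_balance_piles N K A → Pre_min_steps_to_balance_piles N K A → Spec_min_steps_to_balance_piles N K A (min_steps_to_balance_piles N K A)

-- ===== LEMMAS AND PROOFS =====

-- Proof-side description of the common value, over the sorted distinct values S and count map c.
def pvSC (c : Int → Int) (l : List Int) : Int := (l.map c).sum
def pvSV (c : Int → Int) (l : List Int) : Int := (l.map (fun k => k * c k)).sum
def pvCLe (S : List Int) (x : Int) : Nat := S.countP (fun a => decide (a ≤ x))
def pvCLt (S : List Int) (x : Int) : Nat := S.countP (fun a => decide (a < x))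
def pvI0 (S : List Int) (K : Int) : Nat := max 1 (pvCLe S (S.getD 0 0 + K))
def pvP (S : List Int) (K : Int) (t : Nat) : Nat := max (pvI0 S K) (pvCLe S (S.getD t 0 + K))
def pvG (S : List Int) (c : Int → Int) (K : Int) (t : Nat) : Int :=
  pvSV c (S.take t) + pvSV c (S.drop (pvP S K t)) - (S.getD t 0 + K) * pvSC c (S.drop (pvP S K t))
def pvMins (S : List Int) (c : Int → Int) (K : Int) : Nat → Int
  | 0 => pvG S c K 0
  | j+1 => min (pvMins S c K j) (pvG S c K (j+1))
def pvM0 (S : List Int) (K : Int) : Nat := pvCLt S (S.getD (S.length - 1) 0 - K)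
def pvRes (S : List Int) (c : Int → Int) (K : Int) : Int :=
  if S.length ≤ pvI0 S K then 0 else pvMins S c K (min (S.length - 1) (pvM0 S K))


-- index ↔ count characterizations on a sorted list
theorem pv_cLe_iff {S : List Int} (hs : S.Pairwise (· ≤ ·)) (x : Int) :
    ∀ t, t < S.length → ((S.getD t 0 ≤ x) ↔ t < pvCLe S x) := by
  induction S with
  | nil => intro t ht; simp at ht
  | cons a S ih =>
    rcases List.pairwise_cons.mp hs with ⟨ha, hs'⟩
    have h0 : ¬ (a ≤ x) → List.countP (fun a => decide (a ≤ x)) S = 0 := by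
      intro hax
      apply List.countP_eq_zero.mpr
      intro y hy
      simp only [decide_eq_true_eq]
      intro hyx
      exact hax (le_trans (ha y hy) hyx)
    intro t ht
    cases t with
    | zero =>
      simp only [List.getD_cons_zero, pvCLe, List.countP_cons]
      by_cases hax : a ≤ x
      · rw [if_pos (by simp [hax])]
        constructor
        · intro _; omega
        · intro _; exact hax
      · simp only [h0 hax, decide_eq_true_eq]
        rw [if_neg hax]
        constructor
        · intro h; exact absurd h hax
        · intro h; omega
    | succ t =>
      have hlen : t < S.length := by simpa using ht
      simp only [List.getD_cons_succ, pvCLe, List.countP_cons]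
      rw [show S.getD t 0 ≤ x ↔ t < pvCLe S x from ih hs' t hlen]
      simp only [pvCLe, decide_eq_true_eq]
      by_cases hax : a ≤ x
      · rw [if_pos hax]; omega
      · rw [if_neg hax, h0 hax]
        omega


theorem pv_cLt_iff {S : List Int} (hs : S.Pairwise (· ≤ ·)) (x : Int) :
    ∀ t, t < S.length → ((S.getD t 0 < x) ↔ t < pvCLt S x) := by
  induction S with
  | nil => intro t ht; simp at ht
  | cons a S ih =>
    rcases List.pairwise_cons.mp hs with ⟨ha, hs'⟩
    have h0 : ¬ (a < x) → List.countP (fun a => decide (a < x)) S = 0 := by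
      intro hax
      apply List.countP_eq_zero.mpr
      intro y hy
      simp only [decide_eq_true_eq]
      intro hyx
      exact hax (lt_of_le_of_lt (ha y hy) hyx)
    intro t ht
    cases t with
    | zero =>
      simp only [List.getD_cons_zero, pvCLt, List.countP_cons]
      by_cases hax : a < x
      · rw [if_pos (by simp [hax])]
        constructor
        · intro _; omega
        · intro _; exact hax
      · simp only [h0 hax, decide_eq_true_eq]
        rw [if_neg hax]
        constructor
        · intro h; exact absurd h hax
        · intro h; omega
    | succ t =>
      have hlen : t < S.length := by simpa using ht
      simp only [List.getD_cons_succ, pvCLt, List.countP_cons]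
      rw [show S.getD t 0 < x ↔ t < pvCLt S x from ih hs' t hlen]
      simp only [pvCLt, decide_eq_true_eq]
      by_cases hax : a < x
      · rw [if_pos hax]; omega
      · rw [if_neg hax, h0 hax]
        omega


theorem pv_cLe_le_length (S : List Int) (x : Int) : pvCLe S x ≤ S.length :=
  List.countP_le_length

theorem pv_cLt_le_length (S : List Int) (x : Int) : pvCLt S x ≤ S.length :=
  List.countP_le_length

theorem pv_cLe_mono (S : List Int) {x y : Int} (h : x ≤ y) : pvCLe S x ≤ pvCLe S y := by
  apply List.countP_mono_left
  intro a _ ha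
  simp only [decide_eq_true_eq] at *
  omega

theorem pv_bisectRight_eq {S : List Int} (hs : S.Pairwise (· ≤ ·)) (x : Int) :
    PySem.List.bisectRight S x = pvCLe S x := by
  obtain ⟨hb1, hb2, hb3⟩ := PySem.List.bisectRight_spec S x hs
  have hc : pvCLe S x ≤ S.length := pv_cLe_le_length S x
  rcases Nat.lt_trichotomy (PySem.List.bisectRight S x) (pvCLe S x) with h | h | h
  · exfalso
    have hlt : PySem.List.bisectRight S x < S.length := lt_of_lt_of_le h hc
    have h1 : S.getD (PySem.List.bisectRight S x) 0 ≤ x :=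
      (pv_cLe_iff hs x _ hlt).mpr h
    have h2 := hb3 _ hlt (le_refl _)
    rw [List.getD_eq_getElem _ _ hlt] at h1
    omega
  · exact h
  · exfalso
    have hlt : pvCLe S x < S.length := lt_of_lt_of_le h hb1
    have h1 : ¬ (S.getD (pvCLe S x) 0 ≤ x) := by
      rw [pv_cLe_iff hs x _ hlt]; omega
    have h2 := hb2 _ hlt h
    rw [List.getD_eq_getElem _ _ hlt] at h1
    omega

theorem pv_bisectLeft_eq {S : List Int} (hs : S.Pairwise (· ≤ ·)) (x : Int) :
    PySem.List.bisectLeft S x = pvCLt S x := by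
  obtain ⟨hb1, hb2, hb3⟩ := PySem.List.bisectLeft_spec S x hs
  have hc : pvCLt S x ≤ S.length := pv_cLt_le_length S x
  rcases Nat.lt_trichotomy (PySem.List.bisectLeft S x) (pvCLt S x) with h | h | h
  · exfalso
    have hlt : PySem.List.bisectLeft S x < S.length := lt_of_lt_of_le h hc
    have h1 : S.getD (PySem.List.bisectLeft S x) 0 < x :=
      (pv_cLt_iff hs x _ hlt).mpr h
    have h2 := hb3 _ hlt (le_refl _)
    rw [List.getD_eq_getElem _ _ hlt] at h1
    omega
  · exact h
  · exfalso
    have hlt : pvCLt S x < S.length := lt_of_lt_of_le h hb1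
    have h1 : ¬ (S.getD (pvCLt S x) 0 < x) := by
      rw [pv_cLt_iff hs x _ hlt]; omega
    have h2 := hb2 _ hlt h
    rw [List.getD_eq_getElem _ _ hlt] at h1
    omega

-- getD through the (value, count) pairing
theorem pv_Lget (S : List Int) (c : Int → Int) {t : Nat} (ht : t < S.length) :
    (S.map (fun k => (k, c k))).getD t (0,0) = (S.getD t 0, c (S.getD t 0)) := by
  rw [List.getD_eq_getElem _ _ (by simpa using ht), List.getD_eq_getElem _ _ ht]
  simp

theorem pv_getD_mono {S : List Int} (hs : S.Pairwise (· ≤ ·)) {a b : Nat}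
    (hab : a ≤ b) (hb : b < S.length) : S.getD a 0 ≤ S.getD b 0 := by
  rcases Nat.eq_or_lt_of_le hab with rfl | h
  · exact le_refl _
  · rw [List.getD_eq_getElem _ _ (lt_of_le_of_lt hab hb), List.getD_eq_getElem _ _ hb]
    exact List.pairwise_iff_getElem.mp hs a b _ hb h


-- sums over drops/takes
theorem pv_sc_drop_succ {S : List Int} (c : Int → Int) {i : Nat} (hi : i < S.length) :
    pvSC c (S.drop i) = c (S.getD i 0) + pvSC c (S.drop (i+1)) := by
  rw [List.getD_eq_getElem _ _ hi]
  conv_lhs => rw [List.drop_eq_getElem_cons hi]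
  simp only [pvSC, List.map_cons, List.sum_cons]

theorem pv_sv_drop_succ {S : List Int} (c : Int → Int) {i : Nat} (hi : i < S.length) :
    pvSV c (S.drop i) = S.getD i 0 * c (S.getD i 0) + pvSV c (S.drop (i+1)) := by
  rw [List.getD_eq_getElem _ _ hi]
  conv_lhs => rw [List.drop_eq_getElem_cons hi]
  simp only [pvSV, List.map_cons, List.sum_cons]

theorem pv_sv_take_succ {S : List Int} (c : Int → Int) {j : Nat} (hj : j < S.length) :
    pvSV c (S.take (j+1)) = pvSV c (S.take j) + S.getD j 0 * c (S.getD j 0) := by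
  rw [List.take_add_one, List.getElem?_eq_getElem hj, List.getD_eq_getElem _ _ hj]
  simp only [pvSV, Option.toList_some, List.map_append, List.sum_append, List.map_cons,
    List.map_nil, List.sum_cons, List.sum_nil]
  ring

theorem pv_sv_take_drop (c : Int → Int) (S : List Int) (i : Nat) :
    pvSV c (S.take i) + pvSV c (S.drop i) = pvSV c S := by
  conv_rhs => rw [← List.take_append_drop i S]
  simp [pvSV]

theorem pv_sc_take_drop (c : Int → Int) (S : List Int) (i : Nat) :
    pvSC c (S.take i) + pvSC c (S.drop i) = pvSC c S := by
  conv_rhs => rw [← List.take_append_drop i S]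
  simp [pvSC]

-- the 'for i in range(N-1,-1,-1)' search
theorem pv_aFind_spec (S : List Int) (c : Int → Int) (K : Int) (hs : S.Pairwise (· ≤ ·)) :
    ∀ k, k < S.length →
      aFind (S.map (fun k => (k, c k))) (S.getD 0 0) K k
        = if pvCLe S (S.getD 0 0 + K) = 0 then 0 else min k (pvCLe S (S.getD 0 0 + K) - 1) := by
  intro k
  induction k with
  | zero =>
    intro _
    simp only [aFind]
    split <;> simp
  | succ k ih =>
    intro hk
    have hk' : k < S.length := Nat.lt_of_succ_lt hk
    simp only [aFind]
    rw [pv_Lget S c hk]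
    dsimp only
    have hiff := pv_cLe_iff hs (S.getD 0 0 + K) (k+1) hk
    by_cases hc : S.getD (k+1) 0 - S.getD 0 0 ≤ K
    · rw [if_pos hc]
      have h1 : k+1 < pvCLe S (S.getD 0 0 + K) := hiff.mp (by omega)
      rw [if_neg (by omega)]
      omega
    · rw [if_neg hc, ih hk']
      have h1 : ¬ (k+1 < pvCLe S (S.getD 0 0 + K)) := fun h => hc (by have := hiff.mpr h; omega)
      split
      · rfl
      · omega

-- the initializing fold
theorem pv_foldl_pair (v0 K : Int) (l : List (Int × Int)) :
    ∀ (a b : Int),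
      l.foldl (fun (ac : Int × Int) q => (ac.1 + q.2, ac.2 + (q.1 - v0 - K) * q.2)) (a, b)
        = (a + (l.map Prod.snd).sum, b + (l.map (fun q => (q.1 - v0 - K) * q.2)).sum) := by
  induction l with
  | nil => intro a b; simp
  | cons q l ih =>
    intro a b
    simp only [List.foldl_cons, List.map_cons, List.sum_cons, ih]
    rw [Prod.mk.injEq]
    constructor <;> ring

theorem pv_sum_shift (c : Int → Int) (x : Int) (l : List Int) :
    (l.map (fun k => (k - x) * c k)).sum = pvSV c l - x * pvSC c l := by
  induction l with
  | nil => simp [pvSV, pvSC]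
  | cons q l ih => simp [pvSV, pvSC] at *; rw [ih]; ring

-- the inner while loop
theorem pv_aWhile_spec (S : List Int) (c : Int → Int) (K v vn diff : Int)
    (hs : S.Pairwise (· ≤ ·)) :
    ∀ (fuel : Nat), ∀ (i : Nat) (cost : Int), i ≤ S.length → S.length - i ≤ fuel →
    aWhile (S.map (fun k => (k, c k))) S.length K v vn diff fuel i (pvSC c (S.drop i)) cost
      = (max i (pvCLe S (vn + K)),
         pvSC c (S.drop (max i (pvCLe S (vn + K)))),
         cost - (pvSV c (S.drop i) - pvSV c (S.drop (max i (pvCLe S (vn + K)))))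
              + (v + K) * (pvSC c (S.drop i) - pvSC c (S.drop (max i (pvCLe S (vn + K)))))
              - diff * pvSC c (S.drop (max i (pvCLe S (vn + K))))) := by
  intro fuel
  induction fuel with
  | zero =>
    intro i cost hi hfuel
    have hieq : i = S.length := by omega
    subst hieq
    have hq : max S.length (pvCLe S (vn+K)) = S.length := by
      have := pv_cLe_le_length S (vn+K); omega
    simp only [aWhile, hq, List.drop_length]
    simp [pvSC, pvSV]
  | succ fuel ih =>
    intro i cost hi hfuel
    by_cases hin : i < S.length
    · simp only [aWhile]
      rw [if_pos hin, pv_Lget S c hin]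
      dsimp only
      by_cases hcond : S.getD i 0 - vn ≤ K
      · have hlt : i < pvCLe S (vn+K) := (pv_cLe_iff hs (vn+K) i hin).mp (by omega)
        rw [if_pos hcond]
        have hsc := pv_sc_drop_succ (S := S) c hin
        have hsv := pv_sv_drop_succ (S := S) c hin
        rw [show pvSC c (S.drop i) - c (S.getD i 0) = pvSC c (S.drop (i+1)) by rw [hsc]; ring]
        rw [ih (i+1) (cost - (S.getD i 0 - v - K) * c (S.getD i 0)) (by omega) (by omega)]
        have hmax : max (i+1) (pvCLe S (vn+K)) = max i (pvCLe S (vn+K)) := by omega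
        rw [hmax]
        simp only [Prod.mk.injEq]
        refine ⟨trivial, trivial, ?_⟩
        rw [hsv, hsc]
        ring
      · have hge : ¬ (i < pvCLe S (vn+K)) := fun h =>
          hcond (by have := (pv_cLe_iff hs (vn+K) i hin).mpr h; omega)
        rw [if_neg hcond]
        have hmax : max i (pvCLe S (vn+K)) = i := by omega
        rw [hmax]
        simp only [Prod.mk.injEq]
        refine ⟨trivial, trivial, ?_⟩
        ring
    · have hieq : i = S.length := by omega
      subst hieq
      have hq : max S.length (pvCLe S (vn+K)) = S.length := by
        have := pv_cLe_le_length S (vn+K); omega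
      simp only [aWhile, hq, List.drop_length]
      rw [if_neg (by omega)]
      simp [pvSC, pvSV]

theorem pv_pvP_le_length {S : List Int} (K : Int) (hne : S ≠ []) (t : Nat) :
    pvP S K t ≤ S.length := by
  have h1 := pv_cLe_le_length S (S.getD t 0 + K)
  have h2 := pv_cLe_le_length S (S.getD 0 0 + K)
  have h3 : 0 < S.length := List.length_pos_iff.mpr hne
  simp only [pvP, pvI0]
  omega

-- the main 'for j in range(N-1)' loop
theorem pv_aLoop_spec (S : List Int) (c : Int → Int) (K : Int)
    (hs : S.Pairwise (· ≤ ·)) (hne : S ≠ []) :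
    ∀ (rem j : Nat), j + rem = S.length - 1 → j ≤ pvM0 S K →
    aLoop (S.map (fun k => (k, c k))) S.length K rem j (pvP S K j)
        (pvSC c (S.drop (pvP S K j))) (pvG S c K j) (pvMins S c K j)
      = pvMins S c K (min (S.length - 1) (pvM0 S K)) := by
  intro rem
  induction rem with
  | zero =>
    intro j hj hjm
    have hjeq : j = S.length - 1 := by omega
    subst hjeq
    simp only [aLoop]
    rw [show min (S.length - 1) (pvM0 S K) = S.length - 1 by omega]
  | succ rem ih =>
    intro j hj hjm
    have hn1 : 0 < S.length := List.length_pos_iff.mpr hne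
    have hjn : j < S.length := by omega
    have hj1n : j + 1 < S.length := by omega
    simp only [aLoop]
    rw [pv_Lget S c (show S.length - 1 < S.length by omega), pv_Lget S c hjn,
        pv_Lget S c hj1n]
    dsimp only
    have hiffLt := pv_cLt_iff hs (S.getD (S.length - 1) 0 - K) j hjn
    by_cases hbr : S.getD (S.length - 1) 0 - S.getD j 0 ≤ K
    · rw [if_pos hbr]
      have h1 : ¬ (j < pvM0 S K) := fun h => by
        have := hiffLt.mpr h
        omega
      simp only [pvM0] at h1 hjm
      rw [show min (S.length - 1) (pvM0 S K) = j by simp only [pvM0]; omega]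
    · rw [if_neg hbr]
      have hjm0 : j < pvM0 S K := by
        rcases Nat.lt_or_ge j (pvM0 S K) with h | h
        · exact h
        · exfalso
          have h2 : ¬ (S.getD j 0 < S.getD (S.length - 1) 0 - K) := by
            rw [hiffLt]; simp only [pvM0] at h ⊢; omega
          omega
      have hP := pv_pvP_le_length (S := S) K hne j
      rw [pv_aWhile_spec S c K (S.getD j 0) (S.getD (j+1) 0) (S.getD (j+1) 0 - S.getD j 0)
            hs S.length (pvP S K j) _ hP (by omega)]
      have hmono : pvCLe S (S.getD j 0 + K) ≤ pvCLe S (S.getD (j+1) 0 + K) := by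
        apply pv_cLe_mono
        have := pv_getD_mono hs (show j ≤ j+1 by omega) hj1n
        omega
      have hq : max (pvP S K j) (pvCLe S (S.getD (j+1) 0 + K)) = pvP S K (j+1) := by
        simp only [pvP, pvI0] at *
        omega
      rw [hq]
      have hg : pvG S c K j + S.getD j 0 * c (S.getD j 0)
            - (pvSV c (S.drop (pvP S K j)) - pvSV c (S.drop (pvP S K (j+1))))
            + (S.getD j 0 + K) * (pvSC c (S.drop (pvP S K j)) - pvSC c (S.drop (pvP S K (j+1))))
            - (S.getD (j+1) 0 - S.getD j 0) * pvSC c (S.drop (pvP S K (j+1)))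
          = pvG S c K (j+1) := by
        simp only [pvG]
        rw [pv_sv_take_succ c hjn]
        ring
      rw [hg]
      have hans : min (pvMins S c K j) (pvG S c K (j+1)) = pvMins S c K (j+1) := rfl
      rw [hans]
      exact ih (j+1) (by omega) (by omega)

-- B's prefix-table loop
def pvPS (g : Int → Int) : Int → List Int → List Int
  | _, [] => []
  | a, x :: xs => (a + g x) :: pvPS g (a + g x) xs

theorem pv_fold_pcps (g gv : Int → Int) :
    ∀ (xs la lb : List Int) (a b : Int),
      xs.foldl (fun (st : List Int × List Int) v =>
          (st.1 ++ [st.1.getD (st.1.length - 1) 0 + g v],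
           st.2 ++ [st.2.getD (st.2.length - 1) 0 + gv v])) (la ++ [a], lb ++ [b])
        = (la ++ a :: pvPS g a xs, lb ++ b :: pvPS gv b xs) := by
  intro xs
  induction xs with
  | nil => intro la lb a b; simp [pvPS]
  | cons x xs ih =>
    intro la lb a b
    simp only [List.foldl_cons]
    have h1 : ∀ (l : List Int) (y : Int), (l ++ [y]).getD ((l ++ [y]).length - 1) 0 = y := by
      intro l y
      have hlen : (l ++ [y]).length - 1 = l.length := by simp
      rw [hlen]
      simp
    rw [h1 la a, h1 lb b]
    rw [ih (la ++ [a]) (lb ++ [b]) (a + g x) (b + gv x)]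
    simp [pvPS]

theorem pv_pvPS_getD (g : Int → Int) :
    ∀ (xs : List Int) (a : Int) (t : Nat), t ≤ xs.length →
      (a :: pvPS g a xs).getD t 0 = a + ((xs.take t).map g).sum := by
  intro xs
  induction xs with
  | nil =>
    intro a t ht
    have : t = 0 := by simpa using ht
    subst this
    simp
  | cons x xs ih =>
    intro a t ht
    cases t with
    | zero => simp
    | succ t =>
      simp only [pvPS, List.getD_cons_succ]
      rw [ih (a + g x) t (by simpa using ht)]
      simp only [List.take_succ_cons, List.map_cons, List.sum_cons]
      ring

theorem pv_sv_comm (c : Int → Int) (l : List Int) :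
    (l.map (fun v => c v * v)).sum = pvSV c l := by
  induction l with
  | nil => simp [pvSV]
  | cons x l ih => simp [pvSV] at *; rw [ih]; ring

-- min over the candidate range
theorem pv_min_cons_append (y : Int) (l : List Int) (x : Int) :
    (PySem.List.min? ((y :: l) ++ [x]) (fun z => z)).getD 0
      = min ((PySem.List.min? (y :: l) (fun z => z)).getD 0) x := by
  rw [List.cons_append, PySem.List.min?_id_cons, PySem.List.min?_id_cons]
  simp [List.foldl_append]

theorem pv_min_range (S : List Int) (c : Int → Int) (K : Int) :
    ∀ mm : Nat, (PySem.List.min? ((List.range (mm+1)).map (pvG S c K)) (fun x => x)).getD 0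
      = pvMins S c K mm := by
  intro mm
  induction mm with
  | zero => simp [List.range_one, PySem.List.min?_id_cons, pvMins]
  | succ mm ih =>
    have hcons : ∃ y l, (List.range (mm+1)).map (pvG S c K) = y :: l := by
      rw [List.range_succ_eq_map]
      exact ⟨_, _, rfl⟩
    obtain ⟨y, l, hyl⟩ := hcons
    rw [List.range_succ, List.map_append, hyl]
    simp only [List.map_cons, List.map_nil]
    rw [pv_min_cons_append, ← hyl, ih]
    rfl

-- port A computes pvRes
theorem pv_portA (N K : Int) (A : List Int) (hne : A ≠ []) :
    min_steps_to_balance_piles N K A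
      = pvRes (PySem.List.sorted (PySem.Set.ofList A) (fun x => x))
          (fun k => ((A.count k : Nat) : Int)) K := by
  set S := PySem.List.sorted (PySem.Set.ofList A) (fun x => x) with hSdef
  set c : Int → Int := fun k => ((A.count k : Nat) : Int) with hcdef
  have hstrict : S.Pairwise (· < ·) := PySem.List.sorted_ofList_pairwise_lt A
  have hs : S.Pairwise (· ≤ ·) := hstrict.imp le_of_lt
  have hne' : S ≠ [] := by
    obtain ⟨a, A', rfl⟩ := List.exists_cons_of_ne_nil hne
    have ha : a ∈ S := by
      rw [hSdef, PySem.List.mem_sorted]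
      exact (PySem.Set.mem_ofList _ _).mpr (by simp)
    exact List.ne_nil_of_mem ha
  have hn : 0 < S.length := List.length_pos_iff.mpr hne'
  have hL : PySem.List.sorted (PySem.Dict.counter A).items (fun p => p.1)
      = S.map (fun k => (k, c k)) := by
    apply PySem.List.sorted_eq_of_perm_of_pairwise_lt
    · rw [PySem.Dict.items_counter]
      exact List.Perm.map _ (PySem.List.sorted_perm (PySem.Set.ofList A) (fun x => x) false)
    · rw [List.pairwise_map]
      exact hstrict
  simp only [min_steps_to_balance_piles]
  rw [hL]
  simp only [List.length_map]
  rw [if_neg (by omega)]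
  rw [pv_Lget S c hn]
  dsimp only
  rw [pv_aFind_spec S c K hs (S.length - 1) (by omega)]
  have hi0 : (if pvCLe S (S.getD 0 0 + K) = 0 then 0
      else min (S.length - 1) (pvCLe S (S.getD 0 0 + K) - 1)) + 1 = pvI0 S K := by
    have := pv_cLe_le_length S (S.getD 0 0 + K)
    simp only [pvI0]
    split <;> omega
  rw [hi0]
  by_cases hbig : S.length ≤ pvI0 S K
  · rw [if_pos hbig]
    simp [pvRes, hbig]
  · rw [if_neg hbig]
    rw [← List.map_drop, pv_foldl_pair]
    have hsum1 : (((S.drop (pvI0 S K)).map (fun k => (k, c k))).map Prod.snd).sum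
        = pvSC c (S.drop (pvI0 S K)) := by
      simp only [pvSC, List.map_map]
      rfl
    have hsum2 : (((S.drop (pvI0 S K)).map (fun k => (k, c k))).map
          (fun q => (q.1 - S.getD 0 0 - K) * q.2)).sum
        = pvSV c (S.drop (pvI0 S K)) - (S.getD 0 0 + K) * pvSC c (S.drop (pvI0 S K)) := by
      rw [List.map_map]
      rw [show ((fun (q : Int × Int) => (q.1 - S.getD 0 0 - K) * q.2) ∘ (fun k => (k, c k)))
            = (fun k => (k - (S.getD 0 0 + K)) * c k) from funext (fun k => by dsimp; ring)]
      exact pv_sum_shift c (S.getD 0 0 + K) (S.drop (pvI0 S K))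
    rw [hsum1, hsum2]
    dsimp only
    simp only [zero_add]
    have hp0 : pvP S K 0 = pvI0 S K := by
      simp only [pvP, pvI0]
      omega
    have hg0 : pvG S c K 0
        = pvSV c (S.drop (pvI0 S K)) - (S.getD 0 0 + K) * pvSC c (S.drop (pvI0 S K)) := by
      simp [pvG, hp0, pvSV]
    rw [← hg0, ← hp0]
    have hloop := pv_aLoop_spec S c K hs hne' (S.length - 1) 0 (by omega) (by omega)
    rw [show pvMins S c K 0 = pvG S c K 0 from rfl] at hloop
    rw [hloop]
    simp [pvRes, hbig]

-- port B computes pvRes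
theorem pv_portB (N K : Int) (A : List Int) (hne : A ≠ []) :
    min_steps_to_balance_piles_alt N K A
      = pvRes (PySem.List.sorted (PySem.Set.ofList A) (fun x => x))
          (fun k => ((A.count k : Nat) : Int)) K := by
  set S := PySem.List.sorted (PySem.Set.ofList A) (fun x => x) with hSdef
  set c : Int → Int := fun k => ((A.count k : Nat) : Int) with hcdef
  have hstrict : S.Pairwise (· < ·) := PySem.List.sorted_ofList_pairwise_lt A
  have hs : S.Pairwise (· ≤ ·) := hstrict.imp le_of_lt
  have hne' : S ≠ [] := by
    obtain ⟨a, A', rfl⟩ := List.exists_cons_of_ne_nil hne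
    have ha : a ∈ S := by
      rw [hSdef, PySem.List.mem_sorted]
      exact (PySem.Set.mem_ofList _ _).mpr (by simp)
    exact List.ne_nil_of_mem ha
  have hn : 0 < S.length := List.length_pos_iff.mpr hne'
  have hvals : PySem.List.sorted (PySem.Dict.counter A).keys (fun v => v) = S := by
    rw [PySem.Dict.keys_counter]
  simp only [min_steps_to_balance_piles_alt]
  rw [hvals]
  rw [if_neg (by omega)]
  have hfun : (fun (st : List Int × List Int) v =>
      (st.1 ++ [st.1.getD (st.1.length - 1) 0 + (PySem.Dict.counter A).getD v 0],
       st.2 ++ [st.2.getD (st.2.length - 1) 0 + (PySem.Dict.counter A).getD v 0 * v]))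
      = (fun (st : List Int × List Int) v =>
      (st.1 ++ [st.1.getD (st.1.length - 1) 0 + c v],
       st.2 ++ [st.2.getD (st.2.length - 1) 0 + c v * v])) := by
    funext st v
    rw [PySem.Dict.getD_counter]
  rw [hfun]
  rw [show (([(0 : Int)], [(0 : Int)]) : List Int × List Int)
        = (([] : List Int) ++ [(0 : Int)], ([] : List Int) ++ [(0 : Int)]) by simp]
  rw [pv_fold_pcps c (fun v => c v * v) S [] [] 0 0]
  simp only [List.nil_append]
  simp only [pv_bisectRight_eq hs, pv_bisectLeft_eq hs]
  rw [show max 1 (pvCLe S (S.getD 0 0 + K)) = pvI0 S K from rfl]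
  by_cases hbig : S.length ≤ pvI0 S K
  · rw [if_pos hbig]
    simp [pvRes, hbig]
  · rw [if_neg hbig]
    have hmap : (List.range (min (S.length - 1) (pvCLt S (S.getD (S.length - 1) 0 - K)) + 1)).map
          (fun t =>
            (0 :: pvPS (fun v => c v * v) 0 S).getD t 0
              + ((0 :: pvPS (fun v => c v * v) 0 S).getD S.length 0
                 - (0 :: pvPS (fun v => c v * v) 0 S).getD
                     (max (pvI0 S K) (pvCLe S (S.getD t 0 + K))) 0)
              - (S.getD t 0 + K)
                * ((0 :: pvPS c 0 S).getD S.length 0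
                   - (0 :: pvPS c 0 S).getD (max (pvI0 S K) (pvCLe S (S.getD t 0 + K))) 0))
        = (List.range (min (S.length - 1) (pvCLt S (S.getD (S.length - 1) 0 - K)) + 1)).map
            (pvG S c K) := by
      apply List.map_congr_left
      intro t ht
      rw [List.mem_range] at ht
      have htm : t < S.length := by omega
      have hple := pv_pvP_le_length (S := S) K hne' t
      rw [show max (pvI0 S K) (pvCLe S (S.getD t 0 + K)) = pvP S K t from rfl]
      rw [pv_pvPS_getD (fun v => c v * v) S 0 t (Nat.le_of_lt htm),
          pv_pvPS_getD (fun v => c v * v) S 0 S.length (Nat.le_refl _),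
          pv_pvPS_getD (fun v => c v * v) S 0 (pvP S K t) hple,
          pv_pvPS_getD c S 0 S.length (Nat.le_refl _),
          pv_pvPS_getD c S 0 (pvP S K t) hple]
      simp only [zero_add, List.take_length]
      rw [pv_sv_comm c (S.take t), pv_sv_comm c (S.take (pvP S K t)), pv_sv_comm c S]
      rw [show ((S.take (pvP S K t)).map c).sum = pvSC c (S.take (pvP S K t)) from rfl,
          show (S.map c).sum = pvSC c S from rfl]
      rw [show pvSV c S = pvSV c (S.take (pvP S K t)) + pvSV c (S.drop (pvP S K t)) from
            (pv_sv_take_drop c S _).symm,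
          show pvSC c S = pvSC c (S.take (pvP S K t)) + pvSC c (S.drop (pvP S K t)) from
            (pv_sc_take_drop c S _).symm]
      simp only [pvG]
      ring
    rw [hmap]
    rw [show pvCLt S (S.getD (S.length - 1) 0 - K) = pvM0 S K from rfl]
    rw [pv_min_range S c K]
    simp [pvRes, hbig]

-- ===== VERDICT (by name: the statement is the Claim_ definition above) =====
theorem min_steps_to_balance_piles_spec : Claim_equal_min_steps_to_balance_piles := by
  intro N K A _ hpre
  unfold Spec_min_steps_to_balance_piles
  rw [pv_portA N K A hpre, pv_portB N K A hpre]
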